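-- pv_equiv track=rewrite | github.com/PierrickRoyer/SQ_Maize_Assistant | functions/HandleParam.py | find_common_parameters
-- ===== SOURCE A (Python) =====
-- def find_common_parameters(genotype_params):
--     # Dictionary to track potential common parameters and their value
--     common_params = {}
--
--     # Get the list of all genotypes
--     genotypes = list(genotype_params.keys())
--
--     # Use the first genotype as a reference
--     reference_genotype = genotypes[0]
--
--     # Loop through all parameters of the reference genotype
--     for param_key, param_value in genotype_params[reference_genotype].items():
--         # Check if all other genotypes have the same value for this parameter
--         if all(genotype_params[genotype].get(param_key) == param_value for genotype in genotypes):
--             common_params[param_key] = param_value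
--
--     return common_params
-- ===== SOURCE B (Python) =====
-- def find_common_parameters(genotype_params):
--     # Tally every (param, value) pair across all genotypes in one counter,
--     # then keep the first genotype's pairs that were seen in every genotype.
--     n = len(genotype_params)
--     counts = {}
--     for params in genotype_params.values():
--         for kv in params.items():
--             counts[kv] = counts.get(kv, 0) + 1
--     reference = list(genotype_params.values())[0]
--     return {k: v for (k, v) in reference.items() if counts.get((k, v), 0) == n}
-- ===== Notes on version B (the rewrite author's own statement) =====
-- stated objective: alternative
-- what changed: B tallies (param,value) pairs over all genotypes in a single counter dict and keeps first-genotype pairs whose count equals the number of genotypes, instead of A's per-parameter all()-scan over every genotype; correct because a dict holds each key once, so count==n iff every genotype maps the key to that value.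
import Mathlib
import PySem

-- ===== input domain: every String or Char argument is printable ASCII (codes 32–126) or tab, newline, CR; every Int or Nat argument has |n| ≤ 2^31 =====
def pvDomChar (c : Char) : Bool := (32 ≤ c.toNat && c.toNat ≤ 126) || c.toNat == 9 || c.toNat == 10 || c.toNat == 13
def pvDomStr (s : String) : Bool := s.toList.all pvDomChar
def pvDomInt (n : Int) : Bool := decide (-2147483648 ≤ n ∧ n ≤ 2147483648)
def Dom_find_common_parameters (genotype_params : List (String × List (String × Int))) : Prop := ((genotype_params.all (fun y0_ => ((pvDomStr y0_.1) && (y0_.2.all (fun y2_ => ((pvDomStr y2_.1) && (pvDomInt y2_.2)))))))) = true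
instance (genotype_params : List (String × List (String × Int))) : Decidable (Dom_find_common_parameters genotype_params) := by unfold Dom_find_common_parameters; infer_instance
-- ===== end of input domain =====

-- B replaces A's per-parameter all()-scan by a single (param,value) tally across all
-- genotypes plus one filter of the first genotype's items (alternative algorithm, same cost).


-- ===== PORT A =====
def find_common_parameters (genotype_params : List (String × List (String × Int))) : List (String × Int) :=
  let gp : PySem.Dict String (PySem.Dict String Int) :=
    PySem.Dict.ofList (genotype_params.map (fun p => (p.1, PySem.Dict.ofList p.2)))
  let genotypes := gp.keys
  match PySem.List.pyGet? genotypes 0 with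
  | none => []   -- Python raises IndexError here (genotypes[0] of an empty dict); excluded by Pre_
  | some reference_genotype =>
    let refParams := (gp.get? reference_genotype).getD PySem.Dict.empty
    (refParams.items.foldl
      (fun (common_params : PySem.Dict String Int) kv =>
        if genotypes.all (fun g => ((gp.get? g).getD PySem.Dict.empty).get? kv.1 == some kv.2)
        then common_params.insert kv.1 kv.2 else common_params)
      PySem.Dict.empty).items

-- ===== PORT B =====
def find_common_parameters_alt (genotype_params : List (String × List (String × Int))) : List (String × Int) :=
  let gp : PySem.Dict String (PySem.Dict String Int) :=
    PySem.Dict.ofList (genotype_params.map (fun p => (p.1, PySem.Dict.ofList p.2)))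
  let n : Int := gp.size
  let counts : PySem.Dict (String × Int) Int :=
    gp.values.foldl
      (fun counts params =>
        params.items.foldl (fun counts kv => counts.insert kv (counts.getD kv 0 + 1)) counts)
      PySem.Dict.empty
  match PySem.List.pyGet? gp.values 0 with
  | none => []   -- B also indexes list(values())[0]; excluded by Pre_
  | some reference =>
    reference.items.filter (fun kv => counts.getD kv 0 == n)

-- ===== PRECONDITION & SPEC =====
-- Pre_ excludes only the empty dict, on which A raises IndexError at genotypes[0].
def Pre_find_common_parameters (genotype_params : List (String × List (String × Int))) : Prop :=
  genotype_params ≠ []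
instance (genotype_params : List (String × List (String × Int))) : Decidable (Pre_find_common_parameters genotype_params) := by unfold Pre_find_common_parameters; infer_instance
def pvWitness_find_common_parameters : (List (String × List (String × Int))) :=
  [("g1", [("a", 1), ("b", 2)]), ("g2", [("a", 1), ("b", 3)])]

def Spec_find_common_parameters (genotype_params : List (String × List (String × Int))) (out : List (String × Int)) : Prop := out = find_common_parameters_alt genotype_params
instance (genotype_params : List (String × List (String × Int))) (out : List (String × Int)) : Decidable (Spec_find_common_parameters genotype_params out) := by unfold Spec_find_common_parameters; infer_instance

-- ===== CLAIM (what is proved, stated in full; the proofs are below) =====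
def Claim_equal_find_common_parameters : Prop := ∀ (genotype_params : List (String × List (String × Int))), Dom_find_common_parameters genotype_params → Pre_find_common_parameters genotype_params → Spec_find_common_parameters genotype_params (find_common_parameters genotype_params)

-- ===== LEMMAS AND PROOFS =====

-- Any value stored in `d.update ps` was already a value of `d` or appears as a value in `ps`.
lemma pv_mem_values_update {κ ν : Type} [BEq κ] [LawfulBEq κ] (ps : List (κ × ν)) (d : PySem.Dict κ ν)
    (w : ν) (h : w ∈ (d.update ps).values) : w ∈ d.values ∨ w ∈ ps.map Prod.snd := by
  induction ps generalizing d with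
  | nil => exact Or.inl h
  | cons p t ih =>
    have := ih (d.insert p.1 p.2) h
    rcases this with h' | h'
    · rcases PySem.Dict.mem_values_insert d p.1 p.2 w h' with h'' | h''
      · exact Or.inr (by simp [h''])
      · exact Or.inl h''
    · exact Or.inr (by simp; exact Or.inr (by simpa using h'))

-- Every inner dict among the values of the converted outer dict has Nodup keys.
lemma pv_values_nodup (l : List (String × List (String × Int)))
    (v : PySem.Dict String Int)
    (h : v ∈ (PySem.Dict.ofList (l.map (fun p => (p.1, PySem.Dict.ofList p.2)))).values) :
    v.keys.Nodup := by
  rcases pv_mem_values_update _ _ _ h with h' | h'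
  · simp [PySem.Dict.empty, PySem.Dict.values] at h'
  · simp only [List.map_map, List.mem_map] at h'
    rcases h' with ⟨p, _, hp⟩
    simp only [Function.comp] at hp
    rw [← hp]
    exact PySem.Dict.nodup_keys_ofList _

-- A conditional-insert fold over pairwise-fresh keys appends exactly the filtered pairs.
lemma pv_items_foldl_insertIf (p : String × Int → Bool) (l : List (String × Int))
    (d : PySem.Dict String Int)
    (hfresh : ∀ kv ∈ l, d.contains kv.1 = false)
    (hnd : (l.map Prod.fst).Nodup) :
    (l.foldl (fun c kv => if p kv then c.insert kv.1 kv.2 else c) d).items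
      = d.items ++ l.filter p := by
  induction l generalizing d with
  | nil => simp
  | cons kv t ih =>
    simp only [List.foldl_cons]
    by_cases hp : p kv
    · rw [if_pos hp]
      have hfr : ∀ kv' ∈ t, (d.insert kv.1 kv.2).contains kv'.1 = false := by
        intro kv' hkv'
        rw [PySem.Dict.contains_insert]
        have h1 : kv'.1 ≠ kv.1 := by
          simp only [List.map_cons, List.nodup_cons] at hnd
          intro he
          exact hnd.1 (he ▸ List.mem_map.mpr ⟨kv', hkv', rfl⟩)
        simp [h1, hfresh kv' (List.mem_cons_of_mem _ hkv')]
      rw [ih (d.insert kv.1 kv.2) hfr (by simp only [List.map_cons, List.nodup_cons] at hnd; exact hnd.2)]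
      rw [PySem.Dict.items_insert_of_not_contains d kv.2 (hfresh kv (List.mem_cons_self))]
      simp [hp]
    · rw [if_neg hp]
      rw [ih d (fun kv' h => hfresh kv' (List.mem_cons_of_mem _ h))
            (by simp only [List.map_cons, List.nodup_cons] at hnd; exact hnd.2)]
      simp [hp]

-- The nested counting fold tallies, per key, the total multiplicity over all item lists.
lemma pv_counts_getD (ds : List (PySem.Dict String Int)) (c : PySem.Dict (String × Int) Int)
    (kv : String × Int) :
    (ds.foldl
      (fun counts params =>
        params.items.foldl (fun counts kv => counts.insert kv (counts.getD kv 0 + 1)) counts)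
      c).getD kv 0
    = c.getD kv 0 + (ds.map (fun d => (d.items.count kv : Int))).sum := by
  induction ds generalizing c with
  | nil => simp
  | cons d t ih =>
    simp only [List.foldl_cons, List.map_cons, List.sum_cons]
    rw [ih, PySem.Dict.getD_foldl_insert_add_one]
    ring

-- In a dict with Nodup keys, a pair occurs in items once iff get? returns its value.
lemma pv_count_items (d : PySem.Dict String Int) (kv : String × Int) (hnd : d.keys.Nodup) :
    d.items.count kv = if d.get? kv.1 = some kv.2 then 1 else 0 := by
  have hitems : d.items.Nodup := hnd.of_map
  by_cases h : d.get? kv.1 = some kv.2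
  · rw [if_pos h]
    have hm : kv ∈ d.items := by
      have := PySem.Dict.mem_items_of_get?_eq_some d h
      simpa using this
    exact List.count_eq_one_of_mem hitems hm
  · rw [if_neg h]
    apply List.count_eq_zero_of_not_mem
    intro hm
    exact h (PySem.Dict.get?_of_mem_items d (by simpa using hm) hnd)

-- Summing those 0/1 multiplicities counts the dicts that map kv.1 to kv.2.
lemma pv_sum_counts (ds : List (PySem.Dict String Int))
    (hnd : ∀ d ∈ ds, d.keys.Nodup) (kv : String × Int) :
    (ds.map (fun d => (d.items.count kv : Int))).sum
      = (ds.countP (fun d => d.get? kv.1 == some kv.2) : Int) := by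
  induction ds with
  | nil => simp
  | cons d t ih =>
    simp only [List.map_cons, List.sum_cons, List.countP_cons]
    rw [ih (fun d' h => hnd d' (List.mem_cons_of_mem _ h)),
        pv_count_items d kv (hnd d List.mem_cons_self)]
    by_cases h : d.get? kv.1 = some kv.2
    · simp [h]; ring
    · simp [h]

-- Quantifying over the keys of a Nodup-keyed dict via get? is quantifying over its values.
lemma pv_all_keys_eq_all_values (gp : PySem.Dict String (PySem.Dict String Int))
    (hnd : gp.keys.Nodup) (q : PySem.Dict String Int → Bool) :
    gp.keys.all (fun g => q ((gp.get? g).getD PySem.Dict.empty)) = gp.values.all q := by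
  apply Bool.eq_iff_iff.mpr
  simp only [PySem.Dict.keys, PySem.Dict.values, List.all_map, List.all_eq_true]
  constructor
  · intro h p hp
    have := h p hp
    simpa [PySem.Dict.get?_of_mem_items gp (by simpa using hp) hnd] using this
  · intro h p hp
    have := h p hp
    simpa [PySem.Dict.get?_of_mem_items gp (by simpa using hp) hnd] using this

-- ===== VERDICT (by name: the statement is the Claim_ definition above) =====
theorem find_common_parameters_spec : Claim_equal_find_common_parameters := by
  intro genotype_params _ _
  unfold Spec_find_common_parameters find_common_parameters find_common_parameters_alt
  simp only []
  set gp : PySem.Dict String (PySem.Dict String Int) :=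
    PySem.Dict.ofList (genotype_params.map (fun p => (p.1, PySem.Dict.ofList p.2))) with hgp
  have hknd : gp.keys.Nodup := PySem.Dict.nodup_keys_ofList _
  cases hit : gp.items with
  | nil =>
    have hk : gp.keys = [] := by simp [PySem.Dict.keys, hit]
    have hv : gp.values = [] := by simp [PySem.Dict.values, hit]
    rw [hk, hv]
    simp [PySem.List.pyGet?, PySem.List.pyIdx?]
  | cons p rest =>
    have hk : gp.keys = p.1 :: rest.map Prod.fst := by simp [PySem.Dict.keys, hit]
    have hv : gp.values = p.2 :: rest.map Prod.snd := by simp [PySem.Dict.values, hit]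
    have h1 : PySem.List.pyGet? gp.keys 0 = some p.1 := by
      rw [hk]; simp [PySem.List.pyGet?, PySem.List.pyIdx?]
    have h2 : PySem.List.pyGet? gp.values 0 = some p.2 := by
      rw [hv]; simp [PySem.List.pyGet?, PySem.List.pyIdx?]
    rw [h1, h2]
    simp only []
    -- A's reference params are the head value
    have hget : gp.get? p.1 = some p.2 :=
      PySem.Dict.get?_of_mem_items gp (by rw [hit]; exact List.mem_cons_self) hknd
    rw [hget]
    simp only [Option.getD_some]
    have hp2nd : p.2.keys.Nodup := by
      apply pv_values_nodup genotype_params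
      rw [← hgp, hv]; exact List.mem_cons_self
    rw [pv_items_foldl_insertIf _ _ _ (by intro kv _; rfl) (by simpa [PySem.Dict.keys] using hp2nd)]
    rw [show (PySem.Dict.empty : PySem.Dict String Int).items = [] from rfl, List.nil_append]
    apply List.filter_congr
    intro kv _
    -- pointwise: A's all-genotypes scan equals B's count-equals-n test
    have hvals_nd : ∀ d ∈ gp.values, d.keys.Nodup := fun d hd =>
      pv_values_nodup genotype_params d (hgp ▸ hd)
    have hcnt := pv_counts_getD gp.values PySem.Dict.empty kv
    rw [pv_sum_counts gp.values hvals_nd kv, PySem.Dict.getD_empty, zero_add] at hcnt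
    have hall := pv_all_keys_eq_all_values gp hknd (fun d => d.get? kv.1 == some kv.2)
    rw [hall, hcnt]
    have hsz : gp.size = gp.values.length := by
      simp [PySem.Dict.size, PySem.Dict.values]
    apply Bool.eq_iff_iff.mpr
    simp only [List.all_eq_true, beq_iff_eq, hsz]
    rw [Nat.cast_inj]
    constructor
    · intro h
      apply List.countP_eq_length.mpr
      intro d hd
      simpa using h d hd
    · intro h d hd
      have := List.countP_eq_length.mp h d hd
      simpa using this
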